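-- pv_equiv track=rewrite | github.com/sekanderdany/FitData_Insights | step-8-7.py | choose_categories
-- ===== SOURCE A (Python) =====
-- def choose_categories(avg_list):
--     categories = {"concerning": 0, "average": 0, "excellent": 0}
--     for avg_steps in avg_list:
--         if avg_steps < 5000:
--             categories["concerning"] = categories["concerning"] + 1
--         elif 5000 < avg_steps < 10000:
--             categories["average"] = categories['average'] + 1
--         else:
--             categories["excellent"] = categories["excellent"] + 1
--     return categories
-- ===== SOURCE B (Python) =====
-- def choose_categories(avg_list):
--     concerning = sum(1 for x in avg_list if x < 5000)
--     average = sum(1 for x in avg_list if 5000 < x < 10000)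
--     excellent = len(avg_list) - concerning - average
--     return {"concerning": concerning, "average": average, "excellent": excellent}
-- ===== Notes on version B (the rewrite author's own statement) =====
-- stated objective: alternative
-- what changed: Replaces the single pass that mutates a dict of counters with two independent counting passes (concerning and average) and derives excellent by subtraction from the list length, so the else-branch (including values equal to 5000 or >= 10000) is never re-tested.
import Mathlib
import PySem

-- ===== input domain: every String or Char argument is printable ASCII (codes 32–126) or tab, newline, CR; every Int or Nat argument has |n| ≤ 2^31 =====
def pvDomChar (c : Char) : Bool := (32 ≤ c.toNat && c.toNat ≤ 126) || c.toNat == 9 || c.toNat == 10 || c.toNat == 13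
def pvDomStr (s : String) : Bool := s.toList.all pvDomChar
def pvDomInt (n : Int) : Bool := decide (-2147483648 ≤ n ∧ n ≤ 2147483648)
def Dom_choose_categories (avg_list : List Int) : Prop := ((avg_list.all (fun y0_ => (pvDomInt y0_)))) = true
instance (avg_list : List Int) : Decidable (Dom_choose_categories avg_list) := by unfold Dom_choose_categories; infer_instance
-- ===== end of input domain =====

-- B replaces A's single dict-mutating pass by two counting passes plus subtraction (alternative decomposition, same cost).

-- ===== PORT A =====
-- the loop body: one iteration of A's for-loop over the categories dict
def chooseCatStep (d : PySem.Dict String Int) (avg_steps : Int) : PySem.Dict String Int :=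
  if avg_steps < 5000 then
    d.insert "concerning" (d.getD "concerning" 0 + 1)
  else if 5000 < avg_steps ∧ avg_steps < 10000 then
    d.insert "average" (d.getD "average" 0 + 1)
  else
    d.insert "excellent" (d.getD "excellent" 0 + 1)

def choose_categories (avg_list : List Int) : List (String × Int) :=
  (avg_list.foldl chooseCatStep
    (PySem.Dict.ofList [("concerning", 0), ("average", 0), ("excellent", 0)])).items

-- ===== PORT B =====
def choose_categories_alt (avg_list : List Int) : List (String × Int) :=
  let concerning : Int := avg_list.countP (fun x => x < 5000)
  let average : Int := avg_list.countP (fun x => 5000 < x ∧ x < 10000)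
  let excellent : Int := (avg_list.length : Int) - concerning - average
  [("concerning", concerning), ("average", average), ("excellent", excellent)]

-- ===== PRECONDITION & SPEC =====
def Spec_choose_categories (avg_list : List Int) (out : List (String × Int)) : Prop := out = choose_categories_alt avg_list
instance (avg_list : List Int) (out : List (String × Int)) : Decidable (Spec_choose_categories avg_list out) := by unfold Spec_choose_categories; infer_instance

-- ===== CLAIM (what is proved, stated in full; the proofs are below) =====
def Claim_equal_choose_categories : Prop := ∀ (avg_list : List Int), Dom_choose_categories avg_list → Spec_choose_categories avg_list (choose_categories avg_list)

-- ===== LEMMAS AND PROOFS =====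

-- invariant of A's loop: running it from any three-counter dict bumps the three counters
-- by B's two counts and the complementary count
lemma choose_categories_loop (l : List Int) :
    ∀ c a e : Int,
      (l.foldl chooseCatStep (PySem.Dict.mk [("concerning", c), ("average", a), ("excellent", e)])).items
        = [("concerning", c + l.countP (fun x => x < 5000)),
           ("average", a + l.countP (fun x => 5000 < x ∧ x < 10000)),
           ("excellent", e + ((l.length : Int)
              - l.countP (fun x => x < 5000) - l.countP (fun x => 5000 < x ∧ x < 10000)))] := by
  induction l with
  | nil => intro c a e; simp
  | cons x t ih =>
      intro c a e
      simp only [List.foldl_cons, chooseCatStep]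
      by_cases h1 : x < 5000
      · rw [if_pos h1]
        have hins : (PySem.Dict.mk [("concerning", c), ("average", a), ("excellent", e)]).insert
            "concerning" ((PySem.Dict.mk [("concerning", c), ("average", a), ("excellent", e)]).getD "concerning" 0 + 1)
            = PySem.Dict.mk [("concerning", c + 1), ("average", a), ("excellent", e)] := by
          apply PySem.Dict.ext; simp [PySem.Dict.getD_eq_get?_getD, PySem.Dict.get?_mk_cons,
            PySem.Dict.items_insert, PySem.Dict.contains_mk]
        have hna : ¬ (5000 < x ∧ x < 10000) := by omega
        rw [hins, ih]
        simp [h1, hna]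
        omega
      · rw [if_neg h1]
        by_cases h2 : 5000 < x ∧ x < 10000
        · rw [if_pos h2]
          have hins : (PySem.Dict.mk [("concerning", c), ("average", a), ("excellent", e)]).insert
              "average" ((PySem.Dict.mk [("concerning", c), ("average", a), ("excellent", e)]).getD "average" 0 + 1)
              = PySem.Dict.mk [("concerning", c), ("average", a + 1), ("excellent", e)] := by
            apply PySem.Dict.ext; simp [PySem.Dict.getD_eq_get?_getD, PySem.Dict.get?_mk_cons,
              PySem.Dict.items_insert, PySem.Dict.contains_mk]
          rw [hins, ih]
          simp [h1, h2]
          omega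
        · rw [if_neg h2]
          have hins : (PySem.Dict.mk [("concerning", c), ("average", a), ("excellent", e)]).insert
              "excellent" ((PySem.Dict.mk [("concerning", c), ("average", a), ("excellent", e)]).getD "excellent" 0 + 1)
              = PySem.Dict.mk [("concerning", c), ("average", a), ("excellent", e + 1)] := by
            apply PySem.Dict.ext; simp [PySem.Dict.getD_eq_get?_getD, PySem.Dict.get?_mk_cons,
              PySem.Dict.items_insert, PySem.Dict.contains_mk]
          rw [hins, ih]
          simp [h1, h2]
          omega

-- ===== VERDICT (by name: the statement is the Claim_ definition above) =====
theorem choose_categories_spec : Claim_equal_choose_categories := by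
  intro avg_list _
  unfold Spec_choose_categories choose_categories choose_categories_alt
  have hofl : PySem.Dict.ofList [("concerning", (0:Int)), ("average", 0), ("excellent", 0)]
      = PySem.Dict.mk [("concerning", 0), ("average", 0), ("excellent", 0)] := by rfl
  rw [hofl, choose_categories_loop avg_list 0 0 0]
  simp
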